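-- pv_equiv track=rewrite | github.com/ismael-vp/PhishScanner | backend/services/scanners/form_scanner.py | _has_dangerous_scheme
-- ===== SOURCE A (Python) =====
-- from typing import Optional, Set
--
-- DANGEROUS_SCHEMES = {"javascript:", "data:", "vbscript:", "file:", "about:"}
--
-- def _has_dangerous_scheme(action: str) -> Optional[str]:
--     """Detecta si el action usa un esquema peligroso."""
--     if not action:
--         return None
--     action_lower = action.strip().lower()
--     for scheme in DANGEROUS_SCHEMES:
--         if action_lower.startswith(scheme):
--             return scheme
--     return None
-- ===== SOURCE B (Python) =====
-- DANGEROUS_SCHEMES = {"javascript:", "data:", "vbscript:", "file:", "about:"}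
--
-- def _has_dangerous_scheme(action):
--     """Parse the scheme up to the first colon and do one set lookup."""
--     if not action:
--         return None
--     action_lower = action.strip().lower()
--     idx = action_lower.find(':')
--     if idx == -1:
--         return None
--     candidate = action_lower[:idx + 1]
--     return candidate if candidate in DANGEROUS_SCHEMES else None
-- ===== Notes on version B (the rewrite author's own statement) =====
-- stated objective: idiomatic
-- what changed: B replaces A's loop over DANGEROUS_SCHEMES with startswith by parsing the prefix up to the first colon and doing a single set membership test.
import Mathlib
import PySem

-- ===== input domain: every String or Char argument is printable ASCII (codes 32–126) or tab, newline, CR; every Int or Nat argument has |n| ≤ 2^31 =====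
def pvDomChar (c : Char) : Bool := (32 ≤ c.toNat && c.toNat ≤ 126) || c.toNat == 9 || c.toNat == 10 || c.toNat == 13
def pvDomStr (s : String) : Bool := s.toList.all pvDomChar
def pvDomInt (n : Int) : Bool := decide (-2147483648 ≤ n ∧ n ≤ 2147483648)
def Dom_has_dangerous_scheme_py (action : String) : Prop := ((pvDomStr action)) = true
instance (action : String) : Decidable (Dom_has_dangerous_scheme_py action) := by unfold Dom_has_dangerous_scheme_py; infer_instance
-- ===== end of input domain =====

-- B replaces A's startswith loop over the scheme set by parsing the prefix up to the
-- first colon and doing one membership test (idiomatic; same cost).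

-- ===== PORT A =====
def dangerousSchemes : List String := ["javascript:", "data:", "vbscript:", "file:", "about:"]

def findScheme (al : String) : List String → Option String
  | [] => none
  | s :: rest => if PySem.Str.startswith al s then some s else findScheme al rest

def has_dangerous_scheme_py (action : String) : Option String :=
  if action = "" then none
  else findScheme (PySem.Str.lower (PySem.Str.strip action)) dangerousSchemes

-- ===== PORT B =====
def has_dangerous_scheme_py_alt (action : String) : Option String :=
  if action = "" then none
  else
    let al := PySem.Str.lower (PySem.Str.strip action)
    let idx := PySem.Str.find al ":"
    if idx = -1 then none
    else
      let candidate := PySem.Str.slice al none (some (idx + 1))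
      if candidate ∈ dangerousSchemes then some candidate else none

-- ===== PRECONDITION & SPEC =====
def Spec_has_dangerous_scheme_py (action : String) (out : Option String) : Prop := out = has_dangerous_scheme_py_alt action
instance (action : String) (out : Option String) : Decidable (Spec_has_dangerous_scheme_py action out) := by unfold Spec_has_dangerous_scheme_py; infer_instance

-- ===== CLAIM (what is proved, stated in full; the proofs are below) =====
def Claim_equal_has_dangerous_scheme_py : Prop := ∀ (action : String), Dom_has_dangerous_scheme_py action → Spec_has_dangerous_scheme_py action (has_dangerous_scheme_py action)

-- ===== LEMMAS AND PROOFS =====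

lemma singleton_prefix_iff (c : Char) (xs : List Char) : [c] <+: xs ↔ xs[0]? = some c := by
  cases xs with
  | nil => simp
  | cons a t => simp [List.cons_prefix_cons, eq_comm]

-- a scheme (nonempty, ':' exactly at its last position) is a prefix of l iff it equals
-- l's prefix up to and including l's first colon, sitting at index i
lemma scheme_prefix_iff (s l : List Char) (hne : s ≠ []) (hlast : s.getLast? = some ':')
    (hnc : ':' ∉ s.dropLast) (i : Nat) (hci : l[i]? = some ':')
    (hmin : ∀ j, j < i → l[j]? ≠ some ':') : s <+: l ↔ l.take (i + 1) = s := by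
  have hpos : 0 < s.length := by cases s with | nil => exact absurd rfl hne | cons a t => simp
  have hlg : s.getLast hne = ':' := by
    rw [List.getLast?_eq_some_getLast hne] at hlast
    exact Option.some.inj hlast
  constructor
  · rintro ⟨r, rfl⟩
    have hm : s.length - 1 < s.length := by omega
    have hslast : (s ++ r)[s.length - 1]? = some ':' := by
      rw [List.getElem?_append_left hm, List.getElem?_eq_getElem hm]
      have hv : s[s.length - 1] = ':' := by rw [← List.getLast_eq_getElem hne]; exact hlg
      rw [hv]
    have hieq : i = s.length - 1 := by
      rcases Nat.lt_trichotomy i (s.length - 1) with h | h | h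
      · exfalso
        have hil : i < s.length := by omega
        have hidl : i < s.dropLast.length := by rw [List.length_dropLast]; omega
        rw [List.getElem?_append_left hil, List.getElem?_eq_getElem hil] at hci
        have hdv : s.dropLast[i] = s[i] := List.getElem_dropLast ..
        have : s.dropLast[i] = ':' := hdv.trans (Option.some.inj hci)
        exact hnc (this ▸ List.getElem_mem hidl)
      · exact h
      · exact absurd hslast (hmin _ h)
    rw [hieq]
    have h1 : s.length - 1 + 1 = s.length := by omega
    rw [h1, List.take_left]
  · intro h
    rw [← h]
    exact List.take_prefix _ _

-- the two result computations agree for the lowered/stripped string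
lemma core (al : String) :
    findScheme al dangerousSchemes =
      (if PySem.Str.find al ":" = -1 then none
       else if PySem.Str.slice al none (some (PySem.Str.find al ":" + 1)) ∈ dangerousSchemes
            then some (PySem.Str.slice al none (some (PySem.Str.find al ":" + 1))) else none) := by
  set l := al.toList with hl
  have htl : (":" : String).toList = [':'] := by decide
  have hfind : PySem.Str.find al ":" = PySem.Chars.find l [':'] := by
    rw [PySem.Str.find_eq, htl]
  by_cases hcol : PySem.Chars.find l [':'] = -1
  · -- no colon: nothing matches on either side
    have hno : ¬ [':'] <:+: l := by
      have h := PySem.Chars.findFrom_natCast_eq_neg_one_iff l [':'] 0 (Nat.zero_le _)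
      simp only [Nat.cast_zero, PySem.Chars.findFrom_zero, List.drop_zero] at h
      exact h.mp hcol
    have hni : ':' ∉ l := fun hm => hno ((List.singleton_infix_iff ':' l).mpr hm)
    have hns : ∀ s : List Char, ':' ∈ s → PySem.Chars.startswith al.toList s = false := by
      intro s hs
      rw [Bool.eq_false_iff]
      intro htrue
      exact hni (((PySem.Chars.startswith_iff _ _).mp htrue).subset hs)
    rw [hfind, if_pos hcol]
    simp [findScheme, dangerousSchemes, hns]
  · -- first colon at index i
    have hne1 : PySem.Chars.findFrom l [':'] ((0 : Nat) : Int) ≠ -1 := by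
      simpa [PySem.Chars.findFrom_zero] using hcol
    obtain ⟨hnn, hpre, hmin0⟩ := PySem.Chars.findFrom_natCast_spec l [':'] 0 (Nat.zero_le _) hne1
    simp only [Nat.cast_zero, PySem.Chars.findFrom_zero] at hnn hpre hmin0
    set i : Nat := (PySem.Chars.find l [':']).toNat with hi
    have hfi : PySem.Chars.find l [':'] = (i : Int) := (Int.toNat_of_nonneg hnn).symm
    have hchar : ∀ j : Nat, [':'] <+: l.drop j ↔ l[j]? = some ':' := by
      intro j
      rw [singleton_prefix_iff, List.getElem?_drop, Nat.add_zero]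
    have hci : l[i]? = some ':' := (hchar i).mp hpre
    have hmin' : ∀ j, j < i → l[j]? ≠ some ':' :=
      fun j hj hEq => hmin0 j (Nat.zero_le _) hj ((hchar j).mpr hEq)
    have hcand : (PySem.Str.slice al none (some ((i : Int) + 1))).toList = l.take (i + 1) := by
      rw [PySem.Str.toList_slice, PySem.Chars.slice_eq_listSlice,
        PySem.List.slice_to _ (by omega : (0:Int) ≤ (i : Int) + 1)]
      have h2 : ((i : Int) + 1).toNat = i + 1 := by omega
      rw [h2]
    have key : ∀ s : String, s.toList ≠ [] → s.toList.getLast? = some ':' → ':' ∉ s.toList.dropLast →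
        PySem.Str.startswith al s = (PySem.Str.slice al none (some ((i : Int) + 1)) == s) := by
      intro s h1 h2 h3
      have hiff : s.toList <+: l ↔ l.take (i + 1) = s.toList :=
        scheme_prefix_iff _ _ h1 h2 h3 i hci hmin'
      rw [PySem.Str.startswith_eq]
      cases hb : (PySem.Str.slice al none (some ((i : Int) + 1)) == s) with
      | true =>
        rw [beq_iff_eq] at hb
        have ht : l.take (i + 1) = s.toList := by rw [← hcand, hb]
        exact (PySem.Chars.startswith_iff _ _).mpr (hiff.mpr ht)
      | false =>
        rw [Bool.eq_false_iff]
        intro htrue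
        have hp : s.toList <+: l := (PySem.Chars.startswith_iff _ _).mp htrue
        have : PySem.Str.slice al none (some ((i : Int) + 1)) = s :=
          String.toList_inj.mp (hcand.trans (hiff.mp hp))
        simp [this] at hb
    rw [hfind, hfi, if_neg (by omega : ¬((i : Int) = -1))]
    simp only [findScheme, dangerousSchemes, key "javascript:" (by decide) (by decide) (by decide),
      key "data:" (by decide) (by decide) (by decide), key "vbscript:" (by decide) (by decide) (by decide),
      key "file:" (by decide) (by decide) (by decide), key "about:" (by decide) (by decide) (by decide),
      beq_iff_eq, List.mem_cons, List.not_mem_nil, or_false]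
    split_ifs <;> simp_all

-- ===== VERDICT (by name: the statement is the Claim_ definition above) =====
theorem has_dangerous_scheme_py_spec : Claim_equal_has_dangerous_scheme_py := by
  intro action _
  unfold Spec_has_dangerous_scheme_py has_dangerous_scheme_py has_dangerous_scheme_py_alt
  by_cases h : action = ""
  · simp [h]
  · simp only [if_neg h]
    exact core _
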